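-- pv_equiv track=rewrite | github.com/Svastikkka/LEETCODE | testing.py | maxgrid
-- ===== SOURCE A (Python) =====
-- def maxgrid(grid, K):
--     # N size of rows and M size of cols
--     n = len(grid)
--     m = len(grid[0])
--
--     # To store the prefix sum of matrix
--     sum = [[0 for i in range(m + 1)] for j in range(n + 1)]
--
--     # Create Prefix Sum
--     for i in range(n + 1):
--
--         # Traverse each rows
--         for j in range(m+1):
--             if (i == 0 or j == 0):
--                 sum[i][j] = 0
--                 continue
--
--             # Update the prefix sum
--             # till index i x j
--             sum[i][j] = grid[i - 1][j - 1] + sum[i - 1][j] + \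
--                 sum[i][j - 1]-sum[i - 1][j - 1]
--
--     # To store the maximum size of
--     # matrix with sum <= K
--     ans = 0
--
--     # Traverse the sum matrix
--     for i in range(1, n + 1):
--         for j in range(1, m + 1):
--
--             # Index out of bound
--             if (i + ans - 1 > n or j + ans - 1 > m):
--                 break
--
--             mid = ans
--             lo = ans
--
--             # Maximum possible size
--             # of matrix
--             hi = min(n - i + 1, m - j + 1)
--
--             # Binary Search
--             while (lo < hi):
--
--                 # Find middle index
--                 mid = (hi + lo + 1) // 2
--
--                 # Check whether sum <= K
--                 # or not
--                 # If Yes check for other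
--                 # half of the search
--                 if (sum[i + mid - 1][j + mid - 1] +
--                     sum[i - 1][j - 1] -
--                     sum[i + mid - 1][j - 1] -
--                         sum[i - 1][j + mid - 1] <= K):
--                     lo = mid
--
--                 # Else check it in first
--                 # half
--                 else:
--                     hi = mid - 1
--
--             # Update the maximum size matrix
--             ans = max(ans, lo)
--     return ans
-- ===== SOURCE B (Python) =====
-- def maxgrid(grid, K):
--     n = len(grid)
--     m = len(grid[0])
--
--     # prefix-sum rows: each row pairs the running row sums with the row above
--     rows = [[0] * (m + 1)]
--     for row in grid:
--         run = []
--         acc = 0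
--         for v in row[:m]:
--             acc += v
--             run.append(acc)
--         prev = rows[-1]
--         rows.append([0] + [a + b for a, b in zip(run, prev[1:])])
--
--     def square(i, j, s):
--         return (rows[i + s - 1][j + s - 1] - rows[i + s - 1][j - 1]
--                 - rows[i - 1][j + s - 1] + rows[i - 1][j - 1])
--
--     def grow(i, j, lo, length):
--         # bisection phrased on the interval length
--         if length == 0:
--             return lo
--         h = (length + 1) // 2
--         if square(i, j, lo + h) <= K:
--             return grow(i, j, lo + h, length - h)
--         return grow(i, j, lo, h - 1)
--
--     ans = 0
--     for i in range(1, n + 1):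
--         if i + ans <= n + 1:
--             for j in range(1, m + 1):
--                 if j + ans <= m + 1:
--                     ans = grow(i, j, ans, min(n - i + 1, m - j + 1) - ans)
--     return ans
-- ===== Notes on version B (the rewrite author's own statement) =====
-- stated objective: alternative
-- what changed: B derives each prefix-sum row by zipping running row sums with the previous row instead of A's per-cell 2D inclusion-exclusion recurrence over a preallocated matrix, replaces A's break-driven index loops by guarded for-loops (folds), and re-expresses the per-cell bisection as a recursion on the interval length with an O(1) square-sum helper; the bisection decisions are kept because on grids with negative entries (non-monotone square sums) their exact trace determines the returned value.
-- outside the precondition, e.g. on maxgrid([], 0): A raises IndexError, B raises IndexError; on maxgrid([[1, 2], [3]], 10): A raises IndexError, B raises IndexError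
import Mathlib
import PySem

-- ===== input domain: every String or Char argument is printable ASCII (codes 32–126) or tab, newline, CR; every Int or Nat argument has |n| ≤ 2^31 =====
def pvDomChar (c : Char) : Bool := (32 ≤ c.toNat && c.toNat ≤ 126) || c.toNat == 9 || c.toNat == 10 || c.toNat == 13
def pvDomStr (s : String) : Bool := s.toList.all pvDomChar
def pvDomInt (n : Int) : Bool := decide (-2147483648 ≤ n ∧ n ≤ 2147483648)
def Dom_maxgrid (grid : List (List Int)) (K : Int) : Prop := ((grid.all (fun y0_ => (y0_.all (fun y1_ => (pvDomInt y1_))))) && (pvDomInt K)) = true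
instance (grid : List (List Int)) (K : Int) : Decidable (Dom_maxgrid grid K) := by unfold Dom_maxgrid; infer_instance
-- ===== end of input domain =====

-- B builds each prefix-sum row by zipping running row sums with the previous row
-- (instead of A's 2D inclusion-exclusion recurrence over a preallocated matrix),
-- replaces A's break-driven index loops by guarded folds over ranges, and phrases
-- the per-cell bisection as a recursion on the interval length; the bisection
-- decisions are kept because on grids with negative entries their exact trace
-- determines the returned value.  Same asymptotic cost; proved to return A's
-- exact value.  In port A every loop carries an explicit Nat fuel that only makes
-- the loop total; the fuel supplied always suffices, so it never changes the
-- computation.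

-- ===== PORT A =====
-- matrix read/write, Python's s[i][j] / s[i][j] = v on in-range indices
def mgetA (S : List (List Int)) (i j : Nat) : Int := (S.getD i []).getD j 0
def msetA (S : List (List Int)) (i j : Nat) (v : Int) : List (List Int) :=
  S.set i ((S.getD i []).set j v)

-- body of the prefix-sum double loop
def buildCellA (grid S : List (List Int)) (i j : Nat) : List (List Int) :=
  if i = 0 ∨ j = 0 then msetA S i j 0
  else msetA S i j (mgetA grid (i-1) (j-1) + mgetA S (i-1) j + mgetA S i (j-1) - mgetA S (i-1) (j-1))

-- for j in range(m+1)
def buildRowA (grid : List (List Int)) (m i : Nat) : Nat → Nat → List (List Int) → List (List Int)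
  | 0, _, S => S
  | fuel+1, j, S => if j ≤ m then buildRowA grid m i fuel (j+1) (buildCellA grid S i j) else S

-- for i in range(n+1)
def buildA (grid : List (List Int)) (n m : Nat) : Nat → Nat → List (List Int) → List (List Int)
  | 0, _, S => S
  | fuel+1, i, S => if i ≤ n then buildA grid n m fuel (i+1) (buildRowA grid m i (m+1) 0 S) else S

-- while lo < hi binary search (returns final lo)
def bsA (S : List (List Int)) (K : Int) (i j : Nat) : Nat → Nat → Nat → Nat
  | 0, lo, _ => lo
  | fuel+1, lo, hi =>
    if lo < hi then
      if mgetA S (i + (hi+lo+1)/2 - 1) (j + (hi+lo+1)/2 - 1) + mgetA S (i-1) (j-1)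
           - mgetA S (i + (hi+lo+1)/2 - 1) (j-1) - mgetA S (i-1) (j + (hi+lo+1)/2 - 1) ≤ K
      then bsA S K i j fuel ((hi+lo+1)/2) hi
      else bsA S K i j fuel lo ((hi+lo+1)/2 - 1)
    else lo

-- for j in range(1, m+1) with the two break tests
def rowA (S : List (List Int)) (K : Int) (n m i : Nat) : Nat → Nat → Nat → Nat
  | 0, _, ans => ans
  | fuel+1, j, ans =>
    if j ≤ m then
      if i + ans - 1 > n ∨ j + ans - 1 > m then ans
      else rowA S K n m i fuel (j+1)
        (max ans (bsA S K i j (min (n - i + 1) (m - j + 1) - ans) ans (min (n - i + 1) (m - j + 1))))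
    else ans

-- for i in range(1, n+1)
def mainA (S : List (List Int)) (K : Int) (n m : Nat) : Nat → Nat → Nat → Nat
  | 0, _, ans => ans
  | fuel+1, i, ans => if i ≤ n then mainA S K n m fuel (i+1) (rowA S K n m i (m+1) 1 ans) else ans

def maxgrid (grid : List (List Int)) (K : Int) : Int :=
  let n := grid.length
  let m := (grid.getD 0 []).length     -- grid[0]: IndexError on [] (excluded by Pre_)
  let S := buildA grid n m (n+1) 0 (List.replicate (n+1) (List.replicate (m+1) 0))
  Int.ofNat (mainA S K n m (n+1) 1 0)

-- ===== PORT B =====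
-- running row sums: acc += v; run.append(acc)
def runSumsB (acc : Int) : List Int → List Int
  | [] => []
  | v :: vs => (acc + v) :: runSumsB (acc + v) vs

-- [0] + [a + b for a, b in zip(run, prev[1:])]
def mkRowB (m : Nat) (prev row : List Int) : List Int :=
  0 :: List.zipWith (· + ·) (runSumsB 0 (row.take m)) (prev.drop 1)

-- square(i, j, s): the inclusion-exclusion square sum
def squareB (S : List (List Int)) (i j s : Nat) : Int :=
  (S.getD (i+s-1) []).getD (j+s-1) 0 - (S.getD (i+s-1) []).getD (j-1) 0
  - (S.getD (i-1) []).getD (j+s-1) 0 + (S.getD (i-1) []).getD (j-1) 0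

-- grow(i, j, lo, length): bisection phrased on the interval length
def growB (S : List (List Int)) (K : Int) (i j lo len : Nat) : Nat :=
  if h0 : len = 0 then lo
  else if squareB S i j (lo + (len+1)/2) ≤ K then
    growB S K i j (lo + (len+1)/2) (len - (len+1)/2)
  else growB S K i j lo ((len+1)/2 - 1)
termination_by len
decreasing_by all_goals omega

def maxgrid_alt (grid : List (List Int)) (K : Int) : Int :=
  let n := grid.length
  let m := (grid.getD 0 []).length     -- grid[0]: IndexError on [] (excluded by Pre_)
  -- rows = [[0]*(m+1)]; for row in grid: prev = rows[-1]; rows.append(mkRow)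
  let rows := (grid.foldl
      (fun st row => let cur := mkRowB m st.1 row; (cur, st.2 ++ [cur]))
      (List.replicate (m+1) (0:Int), [List.replicate (m+1) (0:Int)])).2
  Int.ofNat <|
    (List.range' 1 n).foldl (fun ans i =>
      if i + ans ≤ n + 1 then
        (List.range' 1 m).foldl (fun ans j =>
          if j + ans ≤ m + 1 then
            growB rows K i j ans (min (n - i + 1) (m - j + 1) - ans)
          else ans) ans
      else ans) 0

-- ===== PRECONDITION & SPEC =====
-- Pre_ excludes exactly the inputs where the Python raises IndexError: the empty grid
-- (grid[0]) and grids whose later rows are shorter than the first row (grid[i-1][j-1]).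
def Pre_maxgrid (grid : List (List Int)) (K : Int) : Prop :=
  grid ≠ [] ∧ ∀ r ∈ grid, (grid.getD 0 []).length ≤ r.length

instance (grid : List (List Int)) (K : Int) : Decidable (Pre_maxgrid grid K) := by
  unfold Pre_maxgrid; infer_instance

def pvWitness_maxgrid : List (List Int) × Int := ([[1, 2], [3, 4]], 3)

def Spec_maxgrid (grid : List (List Int)) (K : Int) (out : Int) : Prop := out = maxgrid_alt grid K
instance (grid : List (List Int)) (K : Int) (out : Int) : Decidable (Spec_maxgrid grid K out) := by
  unfold Spec_maxgrid; infer_instance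

-- ===== CLAIM (what is proved, stated in full; the proofs are below) =====
def Claim_equal_maxgrid : Prop := ∀ (grid : List (List Int)) (K : Int),
  Dom_maxgrid grid K → Pre_maxgrid grid K → Spec_maxgrid grid K (maxgrid grid K)

-- ===== LEMMAS AND PROOFS =====

-- canonical prefix-sum rows
def csum (g : List Int) (u : Nat) : Int := (g.take u).sum
def cr (g prev : List Int) (u : Nat) : Int := if u = 0 then 0 else csum g u + prev.getD u 0
def crow (g prev : List Int) (m : Nat) : List Int := (List.range (m+1)).map (cr g prev)
def cmat (rows : List (List Int)) (prev : List Int) (m : Nat) : List (List Int) :=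
  match rows with
  | [] => []
  | r :: rs => crow r prev m :: cmat rs (crow r prev m) m

theorem csum_succ (g : List Int) (j : Nat) : csum g (j+1) = csum g j + g.getD j 0 := by
  unfold csum
  rw [List.getD_eq_getElem?_getD, List.take_add_one]
  cases h : g[j]? <;> simp_all

theorem getD_set' {α : Type} (S : List α) (i i' : Nat) (r : α) (d : α) :
    (S.set i r).getD i' d = if i = i' ∧ i < S.length then r else S.getD i' d := by
  rw [List.getD_eq_getElem?_getD, List.getD_eq_getElem?_getD, List.getElem?_set]
  by_cases h1 : i = i'
  · subst h1; by_cases h2 : i < S.length <;> simp [h2]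
  · simp [h1]

theorem set_getD_self {α : Type} (S : List α) (i : Nat) (d : α) (h : i < S.length) :
    S.set i (S.getD i d) = S := by
  rw [List.getD_eq_getElem?_getD, List.getElem?_eq_getElem h]
  simp

theorem map_range_set (f : Nat → Int) (m j : Nat) (v : Int) (h : j < m + 1) :
    ((List.range (m+1)).map f).set j v
      = (List.range (m+1)).map (fun u => if u = j then v else f u) := by
  apply List.ext_getElem
  · simp
  · intro k h1 h2
    simp at h1
    rw [List.getElem_set]
    by_cases hk : j = k <;> simp [hk, h1]
    · omega

theorem map_range_getD (f : Nat → Int) (m u : Nat) (h : u ≤ m) :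
    ((List.range (m+1)).map f).getD u 0 = f u := by
  rw [List.getD_eq_getElem?_getD, List.getElem?_map, List.getElem?_range (by omega)]
  rfl

theorem set_replicate_zero (k j : Nat) :
    (List.replicate k (0 : Int)).set j 0 = List.replicate k 0 := by
  induction k generalizing j with
  | zero => simp
  | succ n ih =>
    cases j <;> simp [List.replicate_succ, ih]

-- ----- B's prefix rows are the canonical rows -----
theorem runSumsB_length (l : List Int) (a : Int) : (runSumsB a l).length = l.length := by
  induction l generalizing a with
  | nil => rfl
  | cons v vs ih => simp [runSumsB, ih]

theorem runSumsB_getElem (l : List Int) (a : Int) (u : Nat) (hu : u < l.length) :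
    (runSumsB a l)[u]'(by rw [runSumsB_length]; exact hu) = a + csum l (u+1) := by
  induction l generalizing a u with
  | nil => simp at hu
  | cons v vs ih =>
    cases u with
    | zero =>
      show a + v = a + csum (v :: vs) 1
      have : csum (v :: vs) 1 = v := by simp [csum]
      rw [this]
    | succ k =>
      have hk : k < vs.length := by simpa using hu
      have := ih (a + v) k hk
      show (runSumsB (a+v) vs)[k]'(by rw [runSumsB_length]; exact hk) = a + csum (v :: vs) (k+2)
      rw [this]
      have : csum (v :: vs) (k+2) = v + csum vs (k+1) := by
        simp [csum, List.take_succ_cons]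
      rw [this]; ring

theorem mkRowB_eq_crow (r prev : List Int) (m : Nat)
    (hr : m ≤ r.length) (hp : prev.length = m + 1) :
    mkRowB m prev r = crow r prev m := by
  have htake : (r.take m).length = m := by simp [hr]
  have hzlen : (List.zipWith (· + ·) (runSumsB 0 (r.take m)) (prev.drop 1)).length = m := by
    rw [List.length_zipWith, runSumsB_length, htake, List.length_drop, hp]
    omega
  have hmklen : (mkRowB m prev r).length = m + 1 := by
    simp only [mkRowB, List.length_cons, hzlen]
  have hcrlen : (crow r prev m).length = m + 1 := by simp [crow]
  apply List.ext_getElem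
  · rw [hmklen, hcrlen]
  · intro u h1 h2
    have hum : u < m + 1 := by rw [hmklen] at h1; exact h1
    have hcrow : (crow r prev m)[u]'h2 = cr r prev u := by
      simp [crow]
    rw [hcrow]
    cases u with
    | zero =>
      show (0:Int) = cr r prev 0
      simp [cr]
    | succ k =>
      have hk : k < m := by omega
      have hget : (mkRowB m prev r)[k+1]'h1
          = (List.zipWith (· + ·) (runSumsB 0 (r.take m)) (prev.drop 1))[k]'(by rw [hzlen]; exact hk) := by
        simp [mkRowB]
      rw [hget, List.getElem_zipWith]
      have hrun : (runSumsB 0 (r.take m))[k]'(by rw [runSumsB_length, htake]; exact hk)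
          = 0 + csum (r.take m) (k+1) := runSumsB_getElem (r.take m) 0 k (by rw [htake]; exact hk)
      have hcs : csum (r.take m) (k+1) = csum r (k+1) := by
        unfold csum
        rw [List.take_take, Nat.min_eq_left (by omega)]
      have hdrop : (prev.drop 1)[k]'(by rw [List.length_drop, hp]; omega)
          = prev[k+1]'(by rw [hp]; exact hum) := by
        rw [List.getElem_drop]
        congr 1
        omega
      have hpget : prev[k+1]'(by rw [hp]; exact hum) = prev.getD (k+1) 0 := by
        rw [List.getD_eq_getElem?_getD,
            List.getElem?_eq_getElem (by rw [hp]; exact hum : k+1 < prev.length)]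
        rfl
      rw [hrun, hcs, hdrop, hpget]
      unfold cr
      rw [if_neg (by omega)]
      ring

theorem buildRowsB_eq (m : Nat) (rows : List (List Int)) :
    ∀ (prev : List Int) (acc : List (List Int)),
      (∀ r ∈ rows, m ≤ r.length) → prev.length = m + 1 →
      (rows.foldl (fun st row => let cur := mkRowB m st.1 row; (cur, st.2 ++ [cur]))
          (prev, acc)).2 = acc ++ cmat rows prev m := by
  induction rows with
  | nil => intro prev acc _ _; simp [cmat]
  | cons r rs ih =>
    intro prev acc hlen hp
    have hc : mkRowB m prev r = crow r prev m :=
      mkRowB_eq_crow r prev m (hlen r (by simp)) hp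
    have hclen : (crow r prev m).length = m + 1 := by simp [crow]
    simp only [List.foldl_cons]
    rw [hc]
    rw [ih (crow r prev m) (acc ++ [crow r prev m]) (fun x hx => hlen x (by simp [hx])) hclen]
    simp [cmat]

-- ----- A's prefix build produces the same canonical rows -----
theorem crow_getD (g prev : List Int) (m u : Nat) (h : u ≤ m) :
    (crow g prev m).getD u 0 = cr g prev u := by
  unfold crow; exact map_range_getD _ m u h

theorem crow_getD0 (g prev : List Int) (m : Nat) : (crow g prev m).getD 0 0 = 0 := by
  rw [crow_getD g prev m 0 (by omega)]; rfl

theorem buildRowA_zero (grid : List (List Int)) (m : Nat) :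
    ∀ fuel j S, S.getD 0 [] = List.replicate (m+1) (0:Int) →
      0 < S.length → buildRowA grid m 0 fuel j S = S := by
  intro fuel
  induction fuel with
  | zero => intro j S _ _; rfl
  | succ fu ih =>
    intro j S h2 h3
    by_cases hj : j ≤ m
    case neg =>
      simp only [buildRowA]
      rw [if_neg hj]
    case pos =>
      simp only [buildRowA]
      rw [if_pos hj]
      have hcell : buildCellA grid S 0 j = S := by
        unfold buildCellA
        rw [if_pos (Or.inl rfl)]
        unfold msetA
        rw [h2, set_replicate_zero, ← h2, set_getD_self S 0 [] h3]
      rw [hcell]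
      exact ih (j+1) S h2 h3

-- closing step of the row pass: once the whole row is canonical, writing it back is a no-op
theorem canon_row_done (grid : List (List Int)) (n m i : Nat) (prev : List Int)
    (S : List (List Int)) (hin : i ≤ n) (hlen : S.length = n + 1)
    (hrow : S.getD i [] = (List.range (m+1)).map
      (fun u => if u < m + 1 then cr (grid.getD (i-1) []) prev u else 0)) :
    S.set i (crow (grid.getD (i-1) []) prev m) = S := by
  have : S.getD i [] = crow (grid.getD (i-1) []) prev m := by
    rw [hrow]
    unfold crow
    apply List.map_congr_left
    intro u hu
    have := List.mem_range.1 hu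
    rw [if_pos (by omega)]
  rw [← this, set_getD_self S i [] (by omega)]

theorem buildRowA_canon (grid : List (List Int)) (n m i : Nat) (prev : List Int)
    (hi1 : 1 ≤ i) (hin : i ≤ n) :
    ∀ fuel j S, m + 1 - j ≤ fuel → j ≤ m + 1 →
      S.length = n + 1 →
      S.getD (i-1) [] = prev → prev.getD 0 0 = 0 →
      S.getD i [] = (List.range (m+1)).map
        (fun u => if u < j then cr (grid.getD (i-1) []) prev u else 0) →
      buildRowA grid m i fuel j S = S.set i (crow (grid.getD (i-1) []) prev m) := by
  intro fuel
  induction fuel with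
  | zero =>
    intro j S h1 h2 hlen hprev hprev0 hrow
    have hj' : j = m + 1 := by omega
    subst hj'
    exact (canon_row_done grid n m i prev S hin hlen hrow).symm
  | succ fu ih =>
    intro j S h1 h2 hlen hprev hprev0 hrow
    by_cases hj : j ≤ m
    case neg =>
      have hj' : j = m + 1 := by omega
      subst hj'
      simp only [buildRowA]
      rw [if_neg (by omega)]
      exact (canon_row_done grid n m i prev S hin hlen hrow).symm
    case pos =>
      simp only [buildRowA]
      rw [if_pos hj]
      set g := grid.getD (i-1) [] with hg
      -- the written value is cr g prev j
      have hval : buildCellA grid S i j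
          = S.set i ((List.range (m+1)).map
              (fun u => if u < j + 1 then cr g prev u else 0)) := by
        have hrowm : ∀ u, u ≤ m → (S.getD i []).getD u 0
            = if u < j then cr g prev u else 0 := by
          intro u hu
          rw [hrow]
          exact map_range_getD _ m u hu
        have hstep : ∀ v, v = cr g prev j →
            S.set i ((S.getD i []).set j v)
              = S.set i ((List.range (m+1)).map
                  (fun u => if u < j + 1 then cr g prev u else 0)) := by
          intro v hv
          rw [hrow, map_range_set _ m j v (by omega)]
          congr 1
          apply List.map_congr_left
          intro u hu
          have hum := List.mem_range.1 hu
          by_cases h : u = j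
          · subst h; rw [if_pos rfl, if_pos (by omega), hv]
          · rw [if_neg h]
            by_cases h2 : u < j
            · rw [if_pos h2, if_pos (by omega)]
            · rw [if_neg h2, if_neg (by omega)]
        unfold buildCellA
        by_cases hj0 : j = 0
        · subst hj0
          rw [if_pos (Or.inr rfl)]
          unfold msetA
          exact hstep 0 rfl
        · rw [if_neg (by rintro (hx | hx) <;> omega)]
          unfold msetA mgetA
          apply hstep
          rw [hprev, hrowm (j-1) (by omega), ← hg]
          have hcrj : cr g prev j = csum g j + prev.getD j 0 := by
            unfold cr; rw [if_neg hj0]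
          rw [if_pos (by omega), hcrj]
          by_cases hj1 : j = 1
          · subst hj1
            have hcr0 : cr g prev (1-1) = 0 := by norm_num [cr]
            have h1' : csum g 1 = g.getD 0 0 := by
              rw [show (1:Nat) = 0 + 1 from rfl, csum_succ]
              unfold csum; simp
            rw [hcr0, h1', show (1:Nat) - 1 = 0 from rfl, hprev0]
            ring
          · have hcr1 : cr g prev (j-1) = csum g (j-1) + prev.getD (j-1) 0 := by
              unfold cr; rw [if_neg (by omega)]
            have h2' : csum g j = csum g (j-1) + g.getD (j-1) 0 := by
              rw [show j = (j-1) + 1 by omega, csum_succ]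
              congr 1 <;> omega
            rw [hcr1, h2']
            ring
      rw [hval]
      rw [ih (j+1) _ (by omega) (by omega)
            (by rw [List.length_set]; exact hlen)
            (by rw [getD_set']; rw [if_neg (by omega)]; exact hprev)
            hprev0
            (by rw [getD_set']; rw [if_pos ⟨rfl, by omega⟩])]
      rw [List.set_set]

-- ----- canonical matrix facts -----
theorem cmat_length (rows : List (List Int)) (prev : List Int) (m : Nat) :
    (cmat rows prev m).length = rows.length := by
  induction rows generalizing prev with
  | nil => rfl
  | cons r rs ih => unfold cmat; simp [ih]

theorem cmat_row_succ (m : Nat) (rows : List (List Int)) :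
    ∀ (prev : List Int) (i : Nat), i < rows.length →
      ((prev :: cmat rows prev m).getD (i+1) [])
        = crow (rows.getD i []) ((prev :: cmat rows prev m).getD i []) m := by
  induction rows with
  | nil => intro prev i h; simp at h
  | cons r rs ih =>
    intro prev i h
    cases i with
    | zero => simp only [cmat, List.getD_cons_succ, List.getD_cons_zero]
    | succ k =>
      have h' : k < rs.length := by simp at h; omega
      have hrec := ih (crow r prev m) k h'
      simp only [cmat, List.getD_cons_succ]
      simpa using hrec

theorem cmat_head0 (m : Nat) (rows : List (List Int)) :
    ∀ (prev : List Int) (i : Nat), prev.getD 0 0 = 0 →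
      (((prev :: cmat rows prev m).getD i []).getD 0 0) = (0:Int) := by
  induction rows with
  | nil =>
    intro prev i h
    cases i with
    | zero => simpa using h
    | succ k => simp [cmat]
  | cons r rs ih =>
    intro prev i h
    cases i with
    | zero => simpa using h
    | succ k =>
      simp only [cmat, List.getD_cons_succ]
      exact ih (crow r prev m) k (crow_getD0 r prev m)

theorem replicate_getD_lt {α : Type} (k i : Nat) (z d : α) (h : i < k) :
    (List.replicate k z).getD i d = z := by
  rw [List.getD_eq_getElem?_getD, List.getElem?_replicate, if_pos h]
  rfl

theorem zrow_eq_map (m : Nat) (f : Nat → Int) :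
    List.replicate (m+1) (0:Int) = (List.range (m+1)).map (fun u => if u < 0 then f u else 0) := by
  apply List.ext_getElem
  · simp
  · intro i _ _
    simp

theorem list_list_ext (X Y : List (List Int)) (h1 : X.length = Y.length)
    (h2 : ∀ i < X.length, X.getD i [] = Y.getD i []) : X = Y := by
  apply List.ext_getElem h1
  intro i hx hy
  have := h2 i hx
  rw [List.getD_eq_getElem?_getD, List.getD_eq_getElem?_getD,
      List.getElem?_eq_getElem hx, List.getElem?_eq_getElem hy] at this
  simpa using this

theorem buildA_canon (grid : List (List Int)) (n m : Nat) (hn : n = grid.length) :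
    ∀ fuel i S, n + 1 - i ≤ fuel → i ≤ n + 1 →
      S.length = n + 1 →
      (∀ i', i' < i →
        S.getD i' [] = ((List.replicate (m+1) (0:Int)) :: cmat grid (List.replicate (m+1) 0) m).getD i' []) →
      (∀ i', i ≤ i' → i' ≤ n → S.getD i' [] = List.replicate (m+1) (0:Int)) →
      (∀ i', i' ≤ n → (buildA grid n m fuel i S).getD i' []
          = ((List.replicate (m+1) (0:Int)) :: cmat grid (List.replicate (m+1) 0) m).getD i' [])
        ∧ (buildA grid n m fuel i S).length = n + 1 := by
  intro fuel
  induction fuel with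
  | zero =>
    intro i S hf hi hlen hc hz
    exact ⟨fun i' h => hc i' (by omega), hlen⟩
  | succ fu ih =>
    intro i S hf hi hlen hc hz
    by_cases hin : i ≤ n
    case neg =>
      simp only [buildA]
      rw [if_neg hin]
      exact ⟨fun i' h => hc i' (by omega), hlen⟩
    case pos =>
      simp only [buildA]
      rw [if_pos hin]
      by_cases hi0 : i = 0
      · subst hi0
        rw [buildRowA_zero grid m (m+1) 0 S (hz 0 (by omega) (by omega)) (by omega)]
        apply ih 1 S (by omega) (by omega) hlen
        · intro i' h
          have : i' = 0 := by omega
          subst this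
          rw [hz 0 (by omega) (by omega)]
          rfl
        · intro i' h1 h2
          exact hz i' (by omega) h2
      · have h1i : 1 ≤ i := by omega
        have hprev0 : (((List.replicate (m+1) (0:Int)) :: cmat grid (List.replicate (m+1) 0) m).getD (i-1) []).getD 0 0 = (0:Int) := by
          apply cmat_head0
          exact replicate_getD_lt (m+1) 0 0 0 (by omega)
        have hrow := buildRowA_canon grid n m i
            (((List.replicate (m+1) (0:Int)) :: cmat grid (List.replicate (m+1) 0) m).getD (i-1) [])
            h1i hin (m+1) 0 S (by omega) (by omega) hlen (hc (i-1) (by omega)) hprev0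
            (by rw [hz i (by omega) hin]; exact zrow_eq_map m _)
        rw [hrow]
        have hCMi : ((List.replicate (m+1) (0:Int)) :: cmat grid (List.replicate (m+1) 0) m).getD i []
            = crow (grid.getD (i-1) [])
                (((List.replicate (m+1) (0:Int)) :: cmat grid (List.replicate (m+1) 0) m).getD (i-1) []) m := by
          have hstep := cmat_row_succ m grid (List.replicate (m+1) 0) (i-1) (by omega)
          rw [show i - 1 + 1 = i by omega] at hstep
          exact hstep
        apply ih (i+1) _ (by omega) (by omega) (by rw [List.length_set]; exact hlen)
        · intro i' h
          rw [getD_set']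
          by_cases hii : i = i'
          · subst hii
            rw [if_pos ⟨rfl, by omega⟩, hCMi]
          · rw [if_neg (by simp [hii])]
            exact hc i' (by omega)
        · intro i' h1 h2
          rw [getD_set', if_neg (by omega)]
          exact hz i' (by omega) h2

theorem prefix_eq (grid : List (List Int)) (m : Nat) :
    buildA grid grid.length m (grid.length+1) 0
        (List.replicate (grid.length+1) (List.replicate (m+1) (0:Int)))
      = (List.replicate (m+1) (0:Int)) :: cmat grid (List.replicate (m+1) 0) m := by
  obtain ⟨h1, h2⟩ := buildA_canon grid grid.length m rfl (grid.length+1) 0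
      (List.replicate (grid.length+1) (List.replicate (m+1) (0:Int))) (by omega) (by omega)
      (by simp) (by intro i' h; omega)
      (by intro i' _ h; exact replicate_getD_lt _ i' _ _ (by omega))
  apply list_list_ext
  · rw [h2]
    simp [cmat_length]
  · intro i hlt
    rw [h2] at hlt
    exact h1 i (by omega)

-- ----- A's binary search is B's length-recursion and stays in range -----
theorem bs_bounds (S : List (List Int)) (K : Int) (i j : Nat) :
    ∀ fuel lo hi, lo ≤ hi →
      lo ≤ bsA S K i j fuel lo hi ∧ bsA S K i j fuel lo hi ≤ hi := by
  intro fuel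
  induction fuel with
  | zero => intro lo hi hlh; exact ⟨Nat.le_refl lo, hlh⟩
  | succ fu ih =>
    intro lo hi hlh
    by_cases hlt : lo < hi
    case neg =>
      simp only [bsA]
      rw [if_neg hlt]
      exact ⟨Nat.le_refl lo, hlh⟩
    case pos =>
      simp only [bsA]
      rw [if_pos hlt]
      split
      · have := ih ((hi+lo+1)/2) hi (by omega)
        omega
      · have := ih lo ((hi+lo+1)/2 - 1) (by omega)
        omega

theorem bsA_eq_growB (S : List (List Int)) (K : Int) (i j : Nat) :
    ∀ fuel lo len, len ≤ fuel →
      bsA S K i j fuel lo (lo + len) = growB S K i j lo len := by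
  intro fuel
  induction fuel with
  | zero =>
    intro lo len hf
    have : len = 0 := by omega
    subst this
    rw [growB]
    rfl
  | succ fu ih =>
    intro lo len hf
    by_cases h0 : len = 0
    · subst h0
      simp only [bsA]
      rw [if_neg (by omega), growB]
      rfl
    · simp only [bsA]
      rw [if_pos (by omega)]
      have hm : (lo + len + lo + 1) / 2 = lo + (len+1)/2 := by omega
      rw [hm]
      have hh1 : 1 ≤ (len+1)/2 := by omega
      have hh2 : (len+1)/2 ≤ len := by omega
      have hiff : (mgetA S (i + (lo + (len+1)/2) - 1) (j + (lo + (len+1)/2) - 1) + mgetA S (i-1) (j-1)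
           - mgetA S (i + (lo + (len+1)/2) - 1) (j-1) - mgetA S (i-1) (j + (lo + (len+1)/2) - 1) ≤ K)
          ↔ squareB S i j (lo + (len+1)/2) ≤ K := by
        simp only [mgetA, squareB]
        constructor <;> intro <;> omega
      rw [growB, dif_neg h0]
      by_cases hc : squareB S i j (lo + (len+1)/2) ≤ K
      · rw [if_pos (hiff.2 hc), if_pos hc]
        have he : lo + len = (lo + (len+1)/2) + (len - (len+1)/2) := by omega
        rw [he]
        exact ih (lo + (len+1)/2) (len - (len+1)/2) (by omega)
      · rw [if_neg (fun hx => hc (hiff.1 hx)), if_neg hc]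
        have he : lo + (len+1)/2 - 1 = lo + ((len+1)/2 - 1) := by omega
        rw [he]
        exact ih lo ((len+1)/2 - 1) (by omega)

theorem growB_bounds (S : List (List Int)) (K : Int) (i j lo len : Nat) :
    lo ≤ growB S K i j lo len ∧ growB S K i j lo len ≤ lo + len := by
  rw [← bsA_eq_growB S K i j len lo len (Nat.le_refl len)]
  exact bs_bounds S K i j len lo (lo + len) (by omega)

-- ----- the main loops agree -----
-- the fold bodies of port B, named for the proofs (definitionally the port's lambdas)
def innerF (S : List (List Int)) (K : Int) (n m i : Nat) (ans j : Nat) : Nat :=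
  if j + ans ≤ m + 1 then growB S K i j ans (min (n - i + 1) (m - j + 1) - ans) else ans

def outerF (S : List (List Int)) (K : Int) (n m : Nat) (ans i : Nat) : Nat :=
  if i + ans ≤ n + 1 then (List.range' 1 m).foldl (innerF S K n m i) ans else ans

theorem foldl_innerF_const (S : List (List Int)) (K : Int) (n m i : Nat) :
    ∀ (l : List Nat) (ans : Nat), (∀ x ∈ l, ¬ (x + ans ≤ m + 1)) →
      l.foldl (innerF S K n m i) ans = ans := by
  intro l
  induction l with
  | nil => intro ans _; rfl
  | cons x xs ih =>
    intro ans h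
    simp only [List.foldl_cons]
    rw [show innerF S K n m i ans x = ans by
      unfold innerF; rw [if_neg (h x (by simp))]]
    exact ih ans (fun y hy => h y (by simp [hy]))

theorem foldl_outerF_const (S : List (List Int)) (K : Int) (n m : Nat) :
    ∀ (l : List Nat) (ans : Nat), (∀ x ∈ l, ¬ (x + ans ≤ n + 1)) →
      l.foldl (outerF S K n m) ans = ans := by
  intro l
  induction l with
  | nil => intro ans _; rfl
  | cons x xs ih =>
    intro ans h
    simp only [List.foldl_cons]
    rw [show outerF S K n m ans x = ans by
      unfold outerF; rw [if_neg (h x (by simp))]]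
    exact ih ans (fun y hy => h y (by simp [hy]))

theorem rowA_eq_fold (S : List (List Int)) (K : Int) (n m i : Nat)
    (hi1 : 1 ≤ i) (hin : i ≤ n) :
    ∀ fa j ans, m + 1 - j ≤ fa → 1 ≤ j → ans ≤ n - i + 1 → ans ≤ m →
      rowA S K n m i fa j ans = (List.range' j (m+1-j)).foldl (innerF S K n m i) ans
      ∧ (List.range' j (m+1-j)).foldl (innerF S K n m i) ans ≤ n - i + 1
      ∧ (List.range' j (m+1-j)).foldl (innerF S K n m i) ans ≤ m := by
  intro fa
  induction fa with
  | zero =>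
    intro j ans hfa hj hb1 hb2
    rw [show m + 1 - j = 0 by omega]
    exact ⟨rfl, hb1, hb2⟩
  | succ fa ih =>
    intro j ans hfa hj hb1 hb2
    by_cases hjm : j ≤ m
    case neg =>
      rw [show m + 1 - j = 0 by omega]
      simp only [rowA]
      rw [if_neg hjm]
      exact ⟨rfl, hb1, hb2⟩
    case pos =>
      rw [show m + 1 - j = (m - j) + 1 by omega, List.range'_succ]
      simp only [rowA, List.foldl_cons]
      rw [if_pos hjm]
      by_cases hbr : j + ans - 1 > m
      · -- A breaks; B's guard fails now and for every later j'
        rw [if_pos (Or.inr hbr)]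
        rw [show innerF S K n m i ans j = ans by
          unfold innerF; rw [if_neg (by omega)]]
        rw [foldl_innerF_const S K n m i _ ans
          (by intro x hx; have := List.mem_range'.1 hx; omega)]
        exact ⟨rfl, hb1, hb2⟩
      · rw [if_neg (by rintro (hx | hx) <;> omega)]
        have hansmin : ans ≤ min (n - i + 1) (m - j + 1) := by omega
        have hbs : bsA S K i j (min (n - i + 1) (m - j + 1) - ans) ans
            (min (n - i + 1) (m - j + 1))
            = growB S K i j ans (min (n - i + 1) (m - j + 1) - ans) := by
          have he : min (n - i + 1) (m - j + 1)
              = ans + (min (n - i + 1) (m - j + 1) - ans) := by omega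
          have hb := bsA_eq_growB S K i j (min (n - i + 1) (m - j + 1) - ans) ans
            (min (n - i + 1) (m - j + 1) - ans) (Nat.le_refl _)
          rw [← he] at hb
          exact hb
        obtain ⟨hlo, hhi⟩ := growB_bounds S K i j ans (min (n - i + 1) (m - j + 1) - ans)
        rw [show innerF S K n m i ans j
            = growB S K i j ans (min (n - i + 1) (m - j + 1) - ans) by
          unfold innerF; rw [if_pos (by omega)]]
        rw [hbs, Nat.max_eq_right (by omega)]
        have hnew1 : growB S K i j ans (min (n - i + 1) (m - j + 1) - ans) ≤ n - i + 1 := by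
          have := min_le_left (n - i + 1) (m - j + 1); omega
        have hnew2 : growB S K i j ans (min (n - i + 1) (m - j + 1) - ans) ≤ m := by
          have := min_le_right (n - i + 1) (m - j + 1); omega
        have := ih (j+1) (growB S K i j ans (min (n - i + 1) (m - j + 1) - ans))
          (by omega) (by omega) hnew1 hnew2
        rw [show m + 1 - (j + 1) = m - j by omega] at this
        exact this

theorem rowA_break (S : List (List Int)) (K : Int) (n m i ans : Nat)
    (h : i + ans - 1 > n) : ∀ fuel, rowA S K n m i fuel 1 ans = ans := by
  intro fuel
  cases fuel with
  | zero => rfl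
  | succ fu =>
    simp only [rowA]
    by_cases hm : 1 ≤ m
    · rw [if_pos hm, if_pos (Or.inl h)]
    · rw [if_neg hm]

theorem mainA_skip (S : List (List Int)) (K : Int) (n m : Nat) :
    ∀ fuel i ans, 1 ≤ i → i + ans - 1 > n → mainA S K n m fuel i ans = ans := by
  intro fuel
  induction fuel with
  | zero => intro i ans _ _; rfl
  | succ fu ih =>
    intro i ans h1 h2
    by_cases hin : i ≤ n
    · simp only [mainA]
      rw [if_pos hin, rowA_break S K n m i ans h2 (m+1)]
      exact ih (i+1) ans (by omega) (by omega)
    · simp only [mainA]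
      rw [if_neg hin]

theorem mainA_eq_fold (S : List (List Int)) (K : Int) (n m : Nat) :
    ∀ fa i ans, n + 1 - i ≤ fa → 1 ≤ i → ans ≤ m → ans ≤ n →
      mainA S K n m fa i ans = (List.range' i (n+1-i)).foldl (outerF S K n m) ans := by
  intro fa
  induction fa with
  | zero =>
    intro i ans hfa h1 h2 h3
    rw [show n + 1 - i = 0 by omega]
    rfl
  | succ fa ih =>
    intro i ans hfa h1 h2 h3
    by_cases hin : i ≤ n
    case neg =>
      rw [show n + 1 - i = 0 by omega]
      simp only [mainA]
      rw [if_neg hin]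
      simp
    case pos =>
      rw [show n + 1 - i = (n - i) + 1 by omega, List.range'_succ]
      simp only [mainA, List.foldl_cons]
      rw [if_pos hin]
      by_cases hg : i + ans ≤ n + 1
      · have hb1 : ans ≤ n - i + 1 := by omega
        obtain ⟨he, hc1, hc2⟩ := rowA_eq_fold S K n m i h1 hin (m+1) 1 ans
          (by omega) (by omega) hb1 h2
        rw [show m + 1 - 1 = m by omega] at he hc1 hc2
        rw [he]
        rw [show outerF S K n m ans i = (List.range' 1 m).foldl (innerF S K n m i) ans by
          unfold outerF; rw [if_pos hg]]
        have := ih (i+1) ((List.range' 1 m).foldl (innerF S K n m i) ans)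
          (by omega) (by omega) hc2 (by omega)
        rw [show n + 1 - (i + 1) = n - i by omega] at this
        exact this
      · have hskip : i + ans - 1 > n := by omega
        rw [rowA_break S K n m i ans hskip (m+1)]
        rw [mainA_skip S K n m fa (i+1) ans (by omega) (by omega)]
        rw [show outerF S K n m ans i = ans by unfold outerF; rw [if_neg hg]]
        rw [foldl_outerF_const S K n m _ ans
          (by intro x hx; have := List.mem_range'.1 hx; omega)]

-- ----- the whole programs agree -----
theorem maxgrid_eq_alt (grid : List (List Int)) (K : Int)
    (hpre : Pre_maxgrid grid K) :
    maxgrid grid K = maxgrid_alt grid K := by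
  obtain ⟨hne, hlens⟩ := hpre
  show Int.ofNat (mainA
      (buildA grid grid.length ((grid.getD 0 []).length) (grid.length+1) 0
        (List.replicate (grid.length+1) (List.replicate ((grid.getD 0 []).length+1) 0)))
      K grid.length ((grid.getD 0 []).length) (grid.length+1) 1 0)
    = Int.ofNat
      ((List.range' 1 grid.length).foldl
        (outerF ((grid.foldl
            (fun st row => let cur := mkRowB ((grid.getD 0 []).length) st.1 row; (cur, st.2 ++ [cur]))
            (List.replicate ((grid.getD 0 []).length+1) (0:Int),
             [List.replicate ((grid.getD 0 []).length+1) (0:Int)])).2)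
          K grid.length ((grid.getD 0 []).length)) 0)
  rw [prefix_eq grid ((grid.getD 0 []).length)]
  rw [buildRowsB_eq ((grid.getD 0 []).length) grid
        (List.replicate ((grid.getD 0 []).length+1) 0)
        [List.replicate ((grid.getD 0 []).length+1) 0]
        (fun r hr => hlens r hr) (by simp)]
  rw [show ([List.replicate ((grid.getD 0 []).length+1) (0:Int)]
        ++ cmat grid (List.replicate ((grid.getD 0 []).length+1) 0) ((grid.getD 0 []).length))
      = (List.replicate ((grid.getD 0 []).length+1) (0:Int))
        :: cmat grid (List.replicate ((grid.getD 0 []).length+1) 0) ((grid.getD 0 []).length)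
    from rfl]
  congr 1
  have := mainA_eq_fold
    ((List.replicate ((grid.getD 0 []).length+1) (0:Int))
      :: cmat grid (List.replicate ((grid.getD 0 []).length+1) 0) ((grid.getD 0 []).length))
    K grid.length ((grid.getD 0 []).length) (grid.length+1) 1 0
    (by omega) (by omega) (by omega) (by omega)
  rw [show grid.length + 1 - 1 = grid.length by omega] at this
  exact this

-- ===== VERDICT (by name: the statement is the Claim_ definition above) =====
theorem maxgrid_spec : Claim_equal_maxgrid := by
  intro grid K _hdom hpre
  unfold Spec_maxgrid
  exact maxgrid_eq_alt grid K hpre
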